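-- pv_equiv track=rewrite | github.com/cse-student/code-wars | Python/7 kyu/7. Complete The Pattern #7 - Cyclical Permutation/solution.py | pattern
-- ===== SOURCE A (Python) =====
-- def pattern(n):
--     if n == 0 or n == None:
--         return ""
--     result = ""
--     for i in range(1,n+1):
--         if i != 1:
--             result += '\n'
--         for j in range(i, n+1):
--             result += str(j)
--         for j in range(1, i):
--             result += str(j)
--     return result
-- ===== SOURCE B (Python) =====
-- def pattern(n):
--     if n == 0 or n is None:
--         return ""
--     nums = [str(j) for j in range(1, n + 1)]
--     rows = [''.join(nums[i - 1:] + nums[:i - 1]) for i in range(1, n + 1)]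
--     return '\n'.join(rows)
-- ===== Notes on version B (the rewrite author's own statement) =====
-- stated objective: simpler
-- what changed: B precomputes the list of number-strings once and builds each line by slice-rotating that list and joining, replacing A's two nested per-digit index loops with string accumulation.
import Mathlib
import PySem

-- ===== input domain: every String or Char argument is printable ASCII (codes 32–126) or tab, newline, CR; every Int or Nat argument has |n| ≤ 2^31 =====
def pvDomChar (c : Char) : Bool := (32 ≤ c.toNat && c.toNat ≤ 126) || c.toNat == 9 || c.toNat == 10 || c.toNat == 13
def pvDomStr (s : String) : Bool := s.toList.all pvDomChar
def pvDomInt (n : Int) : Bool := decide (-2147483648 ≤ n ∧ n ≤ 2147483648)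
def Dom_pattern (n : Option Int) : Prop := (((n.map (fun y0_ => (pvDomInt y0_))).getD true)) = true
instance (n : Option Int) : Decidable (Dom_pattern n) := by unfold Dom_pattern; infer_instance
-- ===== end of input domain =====

-- B builds each line by slice-rotating one precomputed list of number-strings and joins
-- the lines, instead of A's per-character accumulation via two nested index loops (objective: simpler).

-- ===== PORT A =====
def pattern (n : Option Int) : String :=
  match n with
  | none => ""
  | some m =>
    if m = 0 then "" else
    (PySem.List.pyRange 1 (m+1) 1).foldl (fun result i =>
      let result := if i ≠ 1 then result ++ "\n" else result
      let result := (PySem.List.pyRange i (m+1) 1).foldl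
        (fun r j => r ++ PySem.Int.toStr j) result
      (PySem.List.pyRange 1 i 1).foldl
        (fun r j => r ++ PySem.Int.toStr j) result) ""

-- ===== PORT B =====
def pattern_alt (n : Option Int) : String :=
  match n with
  | none => ""
  | some m =>
    if m = 0 then "" else
    let nums := (PySem.List.pyRange 1 (m+1) 1).map PySem.Int.toStr
    let rows := (PySem.List.pyRange 1 (m+1) 1).map (fun i =>
      PySem.Str.join ""
        (PySem.List.slice nums (some (i-1)) none ++ PySem.List.slice nums none (some (i-1))))
    PySem.Str.join "\n" rows

-- ===== PRECONDITION & SPEC =====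
def Spec_pattern (n : Option Int) (out : String) : Prop := out = pattern_alt n
instance (n : Option Int) (out : String) : Decidable (Spec_pattern n out) := by unfold Spec_pattern; infer_instance

-- ===== CLAIM (what is proved, stated in full; the proofs are below) =====
def Claim_equal_pattern : Prop := ∀ (n : Option Int), Dom_pattern n → Spec_pattern n (pattern n)

-- ===== LEMMAS AND PROOFS =====

-- character list of one number
def pvNumChars (j : Int) : List Char := (PySem.Int.toStr j).toList

-- the character content of row i (numbers i..m then 1..i-1)
def pvRow (m i : Int) : List Char :=
  ((PySem.List.pyRange i (m+1) 1).map pvNumChars).flatten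
    ++ ((PySem.List.pyRange 1 i 1).map pvNumChars).flatten

-- A's inner loops: appending str(j) for each j of a list
theorem pv_foldl_toStr (l : List Int) (s : String) :
    (l.foldl (fun r j => r ++ PySem.Int.toStr j) s).toList
      = s.toList ++ (l.map pvNumChars).flatten := by
  induction l generalizing s with
  | nil => simp
  | cons a t ih => simp [ih, pvNumChars]

-- A's outer loop flattens the per-row blocks (separator prefix + row characters)
theorem pv_foldl_outer (m : Int) (l : List Int) (s : String) :
    (l.foldl (fun result i =>
      let result := if i ≠ 1 then result ++ "\n" else result
      let result := (PySem.List.pyRange i (m+1) 1).foldl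
        (fun r j => r ++ PySem.Int.toStr j) result
      (PySem.List.pyRange 1 i 1).foldl
        (fun r j => r ++ PySem.Int.toStr j) result) s).toList
    = s.toList ++ (l.map (fun i =>
        (if i ≠ 1 then ['\n'] else []) ++ pvRow m i)).flatten := by
  induction l generalizing s with
  | nil => simp
  | cons a t ih =>
    simp only [List.foldl_cons, ih, List.map_cons, List.flatten_cons]
    rw [pv_foldl_toStr, pv_foldl_toStr]
    by_cases ha : a ≠ 1 <;> simp [ha, pvRow]

-- join with a separator = head ++ flatten of separator-prefixed tail
theorem pv_join_cons (sep r : List Char) (l : List (List Char)) :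
    PySem.Chars.join sep (r :: l) = r ++ (l.map (fun x => sep ++ x)).flatten := by
  induction l generalizing r with
  | nil => simp [PySem.Chars.join_singleton]
  | cons q t ih =>
    rw [PySem.Chars.join_cons_cons, ih]
    simp

-- ''.join flattens
theorem pv_join_nil (l : List (List Char)) :
    PySem.Chars.join [] l = l.flatten := by
  cases l with
  | nil => simp [PySem.Chars.join_nil]
  | cons r t => rw [pv_join_cons]; simp

-- the row of B, as characters, for 1 ≤ i ≤ m
theorem pv_rowB (m i : Int) (h1 : 1 ≤ i) (h2 : i ≤ m) :
    (PySem.Str.join ""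
      (PySem.List.slice ((PySem.List.pyRange 1 (m+1) 1).map PySem.Int.toStr) (some (i-1)) none
        ++ PySem.List.slice ((PySem.List.pyRange 1 (m+1) 1).map PySem.Int.toStr) none (some (i-1)))).toList
    = pvRow m i := by
  have hsplit : PySem.List.pyRange 1 (m+1) 1
      = PySem.List.pyRange 1 i 1 ++ PySem.List.pyRange i (m+1) 1 :=
    PySem.List.pyRange_one_append 1 i (m+1) h1 (by omega)
  have hlen : (PySem.List.pyRange 1 i 1).length = (i-1).toNat :=
    PySem.List.length_pyRange_one 1 i
  have hfrom : PySem.List.slice ((PySem.List.pyRange 1 (m+1) 1).map PySem.Int.toStr) (some (i-1)) none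
      = (PySem.List.pyRange i (m+1) 1).map PySem.Int.toStr := by
    rw [PySem.List.slice_from _ (by omega : (0:Int) ≤ i-1), hsplit, List.map_append]
    rw [show (i-1).toNat = ((PySem.List.pyRange 1 i 1).map PySem.Int.toStr).length by
      simp [hlen]]
    exact List.drop_left
  have hto : PySem.List.slice ((PySem.List.pyRange 1 (m+1) 1).map PySem.Int.toStr) none (some (i-1))
      = (PySem.List.pyRange 1 i 1).map PySem.Int.toStr := by
    rw [PySem.List.slice_to _ (by omega : (0:Int) ≤ i-1), hsplit, List.map_append]
    rw [show (i-1).toNat = ((PySem.List.pyRange 1 i 1).map PySem.Int.toStr).length by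
      simp [hlen]]
    exact List.take_left
  rw [hfrom, hto]
  simp only [PySem.Str.join]
  rw [String.toList_ofList, show ("".toList) = ([] : List Char) from rfl, pv_join_nil]
  simp only [pvRow, List.map_append, List.flatten_append, List.map_map, Function.comp_def]
  rfl

-- flattening separator-prefixed blocks over range 1..m is a '\n'-join of the rows
theorem pv_sep (rc : Int → List Char) (m : Int) (hpos : 1 ≤ m) :
    (((PySem.List.pyRange 1 (m+1) 1).map (fun i =>
        (if i ≠ 1 then ['\n'] else []) ++ rc i)).flatten)
      = PySem.Chars.join ['\n'] ((PySem.List.pyRange 1 (m+1) 1).map rc) := by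
  rw [PySem.List.pyRange_one_cons (by omega : (1:Int) < m+1)]
  rw [List.map_cons, List.map_cons, pv_join_cons]
  have htail : (PySem.List.pyRange (1+1) (m+1) 1).map (fun i =>
      (if i ≠ 1 then ['\n'] else []) ++ rc i)
      = (PySem.List.pyRange (1+1) (m+1) 1).map (fun i => ['\n'] ++ rc i) := by
    apply List.map_congr_left
    intro i hi
    have : 2 ≤ i := (PySem.List.mem_pyRange_one.mp hi).1
    simp [show i ≠ 1 by omega]
  rw [List.flatten_cons, htail]
  simp only [List.map_map, Function.comp_def]
  simp

-- ===== VERDICT (by name: the statement is the Claim_ definition above) =====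
theorem pattern_spec : Claim_equal_pattern := by
  intro n _
  unfold Spec_pattern
  match n with
  | none => rfl
  | some m =>
    by_cases hm : m = 0
    · simp [pattern, pattern_alt, hm]
    · simp only [pattern, pattern_alt, if_neg hm]
      rw [← String.toList_inj, pv_foldl_outer]
      by_cases hpos : 1 ≤ m
      · rw [show ("".toList) = ([] : List Char) from rfl, List.nil_append,
          pv_sep (pvRow m) m hpos]
        simp only [PySem.Str.join, String.toList_ofList, List.map_map]
        congr 1
        · apply List.map_congr_left
          intro i hi
          have h := PySem.List.mem_pyRange_one.mp hi
          exact (pv_rowB m i h.1 (by omega)).symm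
      · have hnil : PySem.List.pyRange 1 (m+1) 1 = [] :=
          PySem.List.pyRange_one_eq_nil (by omega)
        simp [hnil, PySem.Str.join, PySem.Chars.join_nil]
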